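-- pv_equiv track=rewrite | github.com/CodingTestStudy2/Daily_Morning_Coding_Test | 프로그래머스/lv3/이슬기/prg_중간값.py | solution
-- ===== SOURCE A (Python) =====
-- def solution(n, s):
--     answer = []
--
--     value = s // n
--     remain = s % n
--
--     if value == 0:
--         return [-1]
--
--     answer = list(value for _ in range(n))
--     for i in range(remain):
--         answer[i] += 1
--
--     answer.sort()
--
--     return answer
-- ===== SOURCE B (Python) =====
-- def solution(n, s):
--     if s // n == 0:
--         return [-1]
--     answer = []
--     while n > 0:
--         q = s // n
--         answer.append(q)
--         s -= q
--         n -= 1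
--     return answer
-- ===== Notes on version B (the rewrite author's own statement) =====
-- stated objective: alternative
-- what changed: B replaces A's build-n-copies + increment-loop + sort pipeline with a greedy fair-division loop that emits s // n, subtracts it from s and decrements n, producing the sorted parts directly without ever materialising an unsorted list.
import Mathlib
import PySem

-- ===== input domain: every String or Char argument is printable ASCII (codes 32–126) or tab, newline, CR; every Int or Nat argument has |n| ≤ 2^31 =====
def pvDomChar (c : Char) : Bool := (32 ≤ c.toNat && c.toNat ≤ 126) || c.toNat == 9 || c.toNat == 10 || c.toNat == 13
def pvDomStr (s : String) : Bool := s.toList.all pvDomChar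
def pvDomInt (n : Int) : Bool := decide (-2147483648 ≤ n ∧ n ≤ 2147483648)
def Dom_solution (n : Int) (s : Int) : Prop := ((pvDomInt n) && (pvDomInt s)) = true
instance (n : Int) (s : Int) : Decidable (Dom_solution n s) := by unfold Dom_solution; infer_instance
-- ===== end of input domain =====

-- B replaces A's build-increment-sort pipeline with a single greedy loop that
-- repeatedly emits s // n and subtracts it (a different, fair-division algorithm);
-- Pre_ excludes exactly n = 0, on which A raises ZeroDivisionError.


-- ===== PORT A =====
def solution (n : Int) (s : Int) : List Int :=
  let value := PySem.Int.floordiv s n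
  let remain := PySem.Int.mod s n
  if value = 0 then [-1]
  else
    let answer := (PySem.List.pyRange 0 n 1).map (fun _ => value)
    -- answer[i] += 1: the loop visits i with 0 ≤ i < remain < len(answer),
    -- so List.set i.toNat / List.getD i.toNat is exact here
    let answer := (PySem.List.pyRange 0 remain 1).foldl
      (fun a i => a.set i.toNat (a.getD i.toNat 0 + 1)) answer
    PySem.List.sorted answer (fun x => x) false

-- ===== PORT B =====
-- the 'while n > 0' loop of Source B; terminates because n decreases by 1
def solAltLoop (n : Int) (s : Int) (answer : List Int) : List Int :=
  if 0 < n then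
    let q := PySem.Int.floordiv s n
    solAltLoop (n - 1) (s - q) (answer ++ [q])
  else answer
termination_by n.toNat
decreasing_by omega

def solution_alt (n : Int) (s : Int) : List Int :=
  if PySem.Int.floordiv s n = 0 then [-1]
  else solAltLoop n s []

-- ===== PRECONDITION & SPEC =====
-- Pre_ excludes exactly n = 0, on which the Python A raises ZeroDivisionError.
def Pre_solution (n : Int) (_s : Int) : Prop := n ≠ 0
instance (n : Int) (s : Int) : Decidable (Pre_solution n s) := by unfold Pre_solution; infer_instance
def pvWitness_solution : Int × Int := (3, 7)

def Spec_solution (n : Int) (s : Int) (out : List Int) : Prop := out = solution_alt n s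
instance (n : Int) (s : Int) (out : List Int) : Decidable (Spec_solution n s out) := by unfold Spec_solution; infer_instance

-- ===== CLAIM (what is proved, stated in full; the proofs are below) =====
def Claim_equal_solution : Prop := ∀ (n : Int) (s : Int), Dom_solution n s → Pre_solution n s → Spec_solution n s (solution n s)

-- ===== LEMMAS AND PROOFS =====

lemma pyRange_nonpos (b : Int) (hb : b ≤ 0) : PySem.List.pyRange 0 b 1 = [] := by
  simp only [PySem.List.pyRange]
  norm_num
  intro h; omega

lemma getD_append_len (xs : List Int) (y : Int) (t : List Int) :
    (xs ++ y :: t).getD xs.length 0 = y := by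
  simp [List.getD_eq_getElem?_getD]

lemma set_append_len (xs : List Int) (y z : Int) (t : List Int) :
    (xs ++ y :: t).set xs.length z = xs ++ z :: t := by
  induction xs with
  | nil => simp
  | cons a l ih => simp [ih]

lemma step_at (xs : List Int) (k : Nat) (hk : xs.length = k) (y : Int) (t : List Int) :
    (xs ++ y :: t).set k ((xs ++ y :: t).getD k 0 + 1) = xs ++ (y + 1) :: t := by
  subst hk; rw [getD_append_len, set_append_len]

lemma loop_incr (m : Nat) (v : Int) :
    ∀ k : Nat, k ≤ m →
    (PySem.List.pyRange 0 (k : Int) 1).foldl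
        (fun a i => a.set i.toNat (a.getD i.toNat 0 + 1)) (List.replicate m v)
      = List.replicate k (v + 1) ++ List.replicate (m - k) v := by
  intro k
  induction k with
  | zero => intro _; simp [pyRange_nonpos 0 le_rfl]
  | succ k ih =>
    intro hk
    have h1 : ((k : Int) + 1) = ((k + 1 : Nat) : Int) := by push_cast; ring
    rw [← h1, PySem.List.pyRange_one_succ_right (by positivity), List.foldl_append,
      ih (by omega)]
    simp only [List.foldl_cons, List.foldl_nil, Int.toNat_natCast]
    have h2 : m - k = (m - (k+1)) + 1 := by omega
    rw [h2, List.replicate_succ, step_at _ k (by simp) v _]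
    simp [List.replicate_succ']

lemma fmod_bounds_neg (s n : Int) (hn : n < 0) : n < Int.fmod s n ∧ Int.fmod s n ≤ 0 := by
  have h := @Int.fmod_eq_emod s n
  have h2 : 0 ≤ s % (-n) := Int.emod_nonneg s (by omega)
  have h3 : s % (-n) < -n := Int.emod_lt_of_pos s (by omega)
  have h1 : s % n = s % (-n) := by
    conv_lhs => rw [show n = -(-n) by ring, Int.emod_neg]
  rcases Classical.em (n ∣ s) with hd | hd
  · have : s % n = 0 := Int.emod_eq_zero_of_dvd hd
    simp [hd, this] at h; omega
  · have : ¬ (0 ≤ n ∨ n ∣ s) := by push Not; exact ⟨by omega, hd⟩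
    simp [this] at h
    have h4 : s % n ≠ 0 := fun hc => hd (Int.dvd_of_emod_eq_zero hc)
    omega

-- characterization of fdiv/fmod for a positive divisor
lemma fdivmod_unique (a b q r : Int) (hb : 0 < b) (hr : 0 ≤ r) (hrb : r < b)
    (he : a = b * q + r) : Int.fdiv a b = q ∧ Int.fmod a b = r := by
  have hu := (Int.ediv_emod_unique (a := a) (b := b) (q := q) (r := r) hb).2
    ⟨by omega, hr, hrb⟩
  have h1 : Int.fdiv a b = a / b := by
    rw [Int.fdiv_eq_ediv]; simp [le_of_lt hb]
  have h2 : Int.fmod a b = a % b := by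
    rw [Int.fmod_eq_emod]; simp [le_of_lt hb]
  omega

lemma fmod_fdiv_pos (a b : Int) (hb : 0 < b) :
    a = b * Int.fdiv a b + Int.fmod a b ∧ 0 ≤ Int.fmod a b ∧ Int.fmod a b < b := by
  refine ⟨by linarith [Int.fmod_add_mul_fdiv a b], ?_, ?_⟩
  · have h := @Int.fmod_eq_emod a b
    have := Int.emod_nonneg a hb.ne'
    simp [le_of_lt hb] at h; omega
  · exact Int.fmod_lt_of_pos a hb

-- closed form of B's greedy loop
lemma solAltLoop_closed : ∀ (m : Nat) (n s : Int) (acc : List Int), n.toNat = m →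
    solAltLoop n s acc = acc ++
      (if 0 < n then
        List.replicate (n - Int.fmod s n).toNat (Int.fdiv s n) ++
        List.replicate (Int.fmod s n).toNat (Int.fdiv s n + 1)
       else []) := by
  intro m
  induction m with
  | zero =>
    intro n s acc hm
    rw [solAltLoop]
    have : ¬ 0 < n := by omega
    simp [this]
  | succ m ih =>
    intro n s acc hm
    have hn : 0 < n := by omega
    rw [solAltLoop]
    simp only [hn, if_pos, PySem.Int.floordiv]
    obtain ⟨heq, hr0, hrn⟩ := fmod_fdiv_pos s n hn
    set v := Int.fdiv s n with hv
    set r := Int.fmod s n with hr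
    rw [ih (n - 1) (s - v) (acc ++ [v]) (by omega)]
    by_cases hcase : r < n - 1
    · -- quotient and remainder unchanged on the tail
      have hd : Int.fdiv (s - v) (n - 1) = v ∧ Int.fmod (s - v) (n - 1) = r := by
        by_cases h1 : 0 < n - 1
        · exact fdivmod_unique _ _ _ _ h1 hr0 hcase (by linear_combination heq)
        · omega
      rcases hd with ⟨hd1, hd2⟩
      by_cases h1 : 0 < n - 1
      · simp only [h1, if_pos, hd1, hd2]
        have e1 : (n - r).toNat = (n - 1 - r).toNat + 1 := by omega
        rw [e1, List.replicate_succ]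
        simp
      · omega
    · -- r = n - 1: the head element is v, the tail all get v + 1
      have hre : r = n - 1 := by omega
      by_cases h1 : 0 < n - 1
      · have hd : Int.fdiv (s - v) (n - 1) = v + 1 ∧ Int.fmod (s - v) (n - 1) = 0 := by
          apply fdivmod_unique _ _ _ _ h1 le_rfl h1
          rw [hre] at heq; linear_combination heq
        rcases hd with ⟨hd1, hd2⟩
        simp only [h1, if_pos, hd1, hd2]
        have e1 : (n - r).toNat = 1 := by omega
        have e2 : r.toNat = (n - 1).toNat := by omega
        simp [e1, e2, List.replicate_succ]
      · -- n = 1, r = 0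
        have hn1 : n = 1 := by omega
        have hr1 : r = 0 := by omega
        simp [hn1, hr1]

theorem solution_spec_aux : ∀ (n s : Int), n ≠ 0 → solution n s = solution_alt n s := by
  intro n s hn
  simp only [solution, solution_alt, PySem.Int.mod, PySem.Int.floordiv]
  split_ifs with hv
  · rfl
  · rcases lt_or_gt_of_ne hn with hneg | hpos
    · -- n < 0 : both sides are []
      obtain ⟨hb1, hb2⟩ := fmod_bounds_neg s n hneg
      rw [pyRange_nonpos n (by omega), pyRange_nonpos _ hb2]
      rw [solAltLoop]
      simp [PySem.List.sorted, show ¬ 0 < n by omega]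
    · -- n > 0
      obtain ⟨heq, hr0, hrn⟩ := fmod_fdiv_pos s n hpos
      set v := Int.fdiv s n with hvdef
      set m := n.toNat with hm
      set r := (Int.fmod s n).toNat with hrr
      have hn' : n = (m : Int) := by omega
      have hr' : Int.fmod s n = (r : Int) := by omega
      have hrm : r ≤ m := by omega
      rw [hr', hn', PySem.List.pyRange_zero_natCast]
      simp only [List.map_const', List.length_map, List.length_range]
      rw [loop_incr m v r hrm]
      rw [solAltLoop_closed m ((m : Int)) s [] (by omega), if_pos (by exact_mod_cast by omega)]
      rw [← hn', hr', ← hvdef]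
      have e3 : (n - (r : Int)).toNat = m - r := by omega
      simp only [e3, Int.toNat_natCast, List.nil_append]
      apply PySem.List.sorted_id_eq_of_perm_of_pairwise
      · exact List.perm_append_comm
      · rw [List.pairwise_append]
        refine ⟨?_, ?_, ?_⟩
        · rw [List.pairwise_replicate]; right; exact le_refl v
        · rw [List.pairwise_replicate]; right; exact le_refl (v+1)
        · intro a ha b hb
          rw [List.eq_of_mem_replicate ha, List.eq_of_mem_replicate hb]; omega

-- ===== VERDICT (by name: the statement is the Claim_ definition above) =====
theorem solution_spec : Claim_equal_solution := by
  intro n s _ hpre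
  exact solution_spec_aux n s hpre
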